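-- pv_equiv track=rewrite | github.com/sylvia-ymlin/Leetcode | AI 机考/20251119-3.py | max_pruned_subtree
-- ===== SOURCE A (Python) =====
-- from collections import deque
--
-- def max_pruned_subtree(arr): # 数组表示的完全二叉树
--
--     n = len(arr) # 节点数
--     if n == 0:
--         return [] # 空树直接返回空列表
--
--     # 标记每个位置是否为真实结点（非 None）
--     valid = [x is not None for x in arr] # true or false
--
--     # dp[i]：以 i 为根，允许裁掉贡献不为正的子树后，能得到的最大子树和
--     dp = [0] * n # 初始化 dp 数组，存储每个节点的最大子树和
--
--     best_sum = None  # 全局最大值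
--     best_root = -1   # 对应的根下标
--
--     # 自底向上 DP
--     for i in range(n - 1, -1, -1): # 从最后一个节点到根节点
--         if not valid[i]: # 非真实结点，值为 0
--             dp[i] = 0
--             continue
--         # 计算左右子树贡献
--         left = 2 * i + 1
--         right = 2 * i + 2
--
--         left_dp = dp[left] if left < n and valid[left] else 0
--         right_dp = dp[right] if right < n and valid[right] else 0
--
--         # 允许裁掉贡献不为正的子树
--         cur = arr[i]
--         if left_dp > 0:
--             cur += left_dp
--         if right_dp > 0:
--             cur += right_dp
--
--         dp[i] = cur
--
--         # 更新全局最大值和对应根节点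
--         if best_sum is None or cur > best_sum:
--             best_sum = cur
--             best_root = i
--
--     # 表示只有 None 节点
--     if best_root == -1:
--         return []
--
--     # BFS 构造被裁剪后的最大子树（完全二叉树形式），best_root 对应的是子树根节点在原数组中的下标
--     # 计算子树节点数
--
--     res = []
--     q = deque()
--     # 队列元素：(原数组下标, 新树下标)
--     q.append((best_root, 0))
--
--     while q:
--         oi, ni = q.popleft() # original index, new index
--
--         # 插入的都是有效节点，有效节点之前全部为 None
--         while len(res) <= ni:
--             res.append(None)
--
--         # 插入当前节点值
--         res[ni] = arr[oi]
--         # 左子节点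
--         left = 2 * oi + 1
--         # 右子节点
--         right = 2 * oi + 2
--         # 入队左子节点
--         if left < n and valid[left] and dp[left] > 0: # 只有贡献大于 0 的子树才入队
--             q.append((left, 2 * ni + 1))
--         # 入队右子节点
--         if right < n and valid[right] and dp[right] > 0:
--             q.append((right, 2 * ni + 2))
--
--     # # 去掉末尾多余的 None -> 不会有 None 节点在最后面的情况吧
--     # while res and res[-1] is None:
--     #     res.pop()
--
--     return res
-- ===== SOURCE B (Python) =====
-- def max_pruned_subtree(arr):
--     n = len(arr)
--
--     # dp(i): best obtainable sum of the subtree rooted at i, pruning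
--     # non-positive child contributions (0 for out-of-range / None nodes).
--     def dp(i):
--         if i >= n or arr[i] is None:
--             return 0
--         l = dp(2 * i + 1)
--         r = dp(2 * i + 2)
--         return arr[i] + (l if l > 0 else 0) + (r if r > 0 else 0)
--
--     cands = [(dp(i), i) for i in range(n) if arr[i] is not None]
--     if not cands:
--         return []
--     best_sum, best_root = max(cands)  # max sum, ties -> largest index
--
--     # DFS: copy the kept nodes into a dict new-index -> value.
--     out = {}
--
--     def build(oi, ni):
--         out[ni] = arr[oi]
--         l, r = 2 * oi + 1, 2 * oi + 2
--         if l < n and arr[l] is not None and dp(l) > 0: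
--             build(l, 2 * ni + 1)
--         if r < n and arr[r] is not None and dp(r) > 0:
--             build(r, 2 * ni + 2)
--
--     build(best_root, 0)
--     m = max(out)
--     return [out.get(k) for k in range(m + 1)]
-- ===== Notes on version B (the rewrite author's own statement) =====
-- stated objective: alternative
-- what changed: Replaces the bottom-up index sweep over a mutable dp array with a recursive post-order dp function plus max() over (dp,i) candidate pairs, and replaces the deque-based BFS pad-and-write reconstruction with a recursive DFS that fills a dict of new-index assignments rendered once at the end.
import Mathlib
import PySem

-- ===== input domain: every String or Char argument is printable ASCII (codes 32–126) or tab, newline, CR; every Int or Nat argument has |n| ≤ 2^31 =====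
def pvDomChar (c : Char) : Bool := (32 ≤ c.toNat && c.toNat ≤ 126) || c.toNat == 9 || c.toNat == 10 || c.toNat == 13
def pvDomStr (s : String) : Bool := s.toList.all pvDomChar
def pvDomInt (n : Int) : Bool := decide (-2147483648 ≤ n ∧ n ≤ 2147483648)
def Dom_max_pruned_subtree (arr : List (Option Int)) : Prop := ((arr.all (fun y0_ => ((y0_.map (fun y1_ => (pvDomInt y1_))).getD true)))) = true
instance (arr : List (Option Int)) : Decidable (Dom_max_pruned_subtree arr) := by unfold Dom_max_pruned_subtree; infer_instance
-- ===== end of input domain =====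

-- B re-implements A with a recursive post-order dp + max() over candidates and a
-- recursive DFS building a dict, instead of A's bottom-up index sweep + BFS queue;
-- objective: alternative decomposition (same results, similar cost).

-- ===== PORT A =====

-- measure decrease of the BFS loop (cited by pvBfsA's decreasing_by)
lemma pvBfsA_dec (n oi ni m1 m2 : Nat) (rest : List (Nat × Nat)) (c1 c2 : Prop)
    [Decidable c1] [Decidable c2] (h1 : c1 → 2 * oi + 1 < n) (h2 : c2 → 2 * oi + 2 < n) :
    (((rest ++ (if c1 then [(2 * oi + 1, m1)] else [])
        ++ (if c2 then [(2 * oi + 2, m2)] else [])).map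
      (fun p => 3 ^ (n + 1 - p.1))).sum)
    < ((((oi, ni) :: rest).map (fun p => 3 ^ (n + 1 - p.1))).sum) := by
  simp only [List.map_append, List.sum_append, List.map_cons, List.sum_cons]
  have h3 : ∀ m : Nat, (0:Nat) < 3 ^ m := fun _ => Nat.pow_pos (by norm_num)
  split_ifs with hl hr hr <;>
    simp only [List.map_cons, List.map_nil, List.sum_cons, List.sum_nil] <;>
  [ (have hoi : oi < n := by have := h1 hl; omega
     have e1 : 3 ^ (n + 1 - (2 * oi + 1)) ≤ 3 ^ (n - oi) :=
       Nat.pow_le_pow_right (by norm_num) (by have := h1 hl; omega)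
     have e2 : 3 ^ (n + 1 - (2 * oi + 2)) ≤ 3 ^ (n - oi) :=
       Nat.pow_le_pow_right (by norm_num) (by have := h2 hr; omega)
     have e3 : n + 1 - oi = (n - oi) + 1 := by omega
     rw [e3, pow_succ]
     have := h3 (n - oi); omega);
    (have hoi : oi < n := by have := h1 hl; omega
     have e1 : 3 ^ (n + 1 - (2 * oi + 1)) ≤ 3 ^ (n - oi) :=
       Nat.pow_le_pow_right (by norm_num) (by have := h1 hl; omega)
     have e3 : n + 1 - oi = (n - oi) + 1 := by omega
     rw [e3, pow_succ]
     have := h3 (n - oi); omega);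
    (have hoi : oi < n := by have := h2 hr; omega
     have e2 : 3 ^ (n + 1 - (2 * oi + 2)) ≤ 3 ^ (n - oi) :=
       Nat.pow_le_pow_right (by norm_num) (by have := h2 hr; omega)
     have e3 : n + 1 - oi = (n - oi) + 1 := by omega
     rw [e3, pow_succ]
     have := h3 (n - oi); omega);
    (have := h3 (n + 1 - oi); omega) ]

-- A-side helper: the BFS reconstruction loop (while q: ...), queue of
-- (original index, new index) pairs; Python indices here are always ≥ 0, so Nat.
def pvBfsA (arr : List (Option Int)) (valid : List Bool) (dp : List Int) :
    List (Nat × Nat) → List (Option Int) → List (Option Int)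
  | [], res => res
  | (oi, ni) :: rest, res =>
    -- while len(res) <= ni: res.append(None); then res[ni] = arr[oi]
    let res1 := res ++ List.replicate (ni + 1 - res.length) (none : Option Int)
    let res2 := res1.set ni (arr.getD oi none)
    let left := 2 * oi + 1
    let right := 2 * oi + 2
    let q1 := rest
      ++ (if left < arr.length ∧ valid.getD left false = true ∧ dp.getD left 0 > 0 then
            [(left, 2 * ni + 1)] else [])
      ++ (if right < arr.length ∧ valid.getD right false = true ∧ dp.getD right 0 > 0 then
            [(right, 2 * ni + 2)] else [])
    pvBfsA arr valid dp q1 res2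
termination_by q _ => (q.map (fun p => 3 ^ (arr.length + 1 - p.1))).sum
decreasing_by
  exact pvBfsA_dec arr.length oi ni (2 * ni + 1) (2 * ni + 2) rest _ _
    (fun h => h.1) (fun h => h.1)

-- A-side helper: the body of A's bottom-up loop; state = (dp, best_sum, best_root).
def pvStepA (arr : List (Option Int)) (valid : List Bool)
    (s : List Int × Option Int × Int) (i : Int) : List Int × Option Int × Int :=
  let n : Int := arr.length
  let dp := s.1
  let bestSum := s.2.1
  let bestRoot := s.2.2
  if ¬ (valid.getD i.toNat false = true) then (dp.set i.toNat 0, bestSum, bestRoot)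
  else
    let left : Int := 2 * i + 1
    let right : Int := 2 * i + 2
    let leftDp : Int :=
      if left < n ∧ valid.getD left.toNat false = true then dp.getD left.toNat 0 else 0
    let rightDp : Int :=
      if right < n ∧ valid.getD right.toNat false = true then dp.getD right.toNat 0 else 0
    -- cur = arr[i]; valid[i] holds, so arr[i] is `some`, and getD 0 is its value
    let cur0 : Int := (arr.getD i.toNat none).getD 0
    let cur1 : Int := if leftDp > 0 then cur0 + leftDp else cur0
    let cur : Int := if rightDp > 0 then cur1 + rightDp else cur1
    let dp' := dp.set i.toNat cur
    match bestSum with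
    | none => (dp', some cur, i)
    | some b => if cur > b then (dp', some cur, i) else (dp', some b, bestRoot)

def max_pruned_subtree (arr : List (Option Int)) : List (Option Int) :=
  let n : Int := arr.length
  if arr.length = 0 then []
  else
    let valid : List Bool := arr.map (fun x => x.isSome)
    -- for i in range(n-1, -1, -1): ...  state = (dp, best_sum, best_root)
    let st :=
      (PySem.List.pyRange (n - 1) (-1) (-1)).foldl (pvStepA arr valid)
        (List.replicate arr.length 0, none, -1)
    if st.2.2 = -1 then []
    else pvBfsA arr valid st.1 [(st.2.2.toNat, 0)] []

-- ===== PORT B =====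

-- termination measures of the recursive helpers (cited by decreasing_by)
lemma pvDec1 (n i : Nat) (h : i < n) : n - (2 * i + 1) < n - i := by omega
lemma pvDec2 (n i : Nat) (h : i < n) : n - (2 * i + 2) < n - i := by omega
lemma pvDec1' (n i : Nat) (h : 2 * i + 1 < n) : n - (2 * i + 1) < n - i := by omega
lemma pvDec2' (n i : Nat) (h : 2 * i + 2 < n) : n - (2 * i + 2) < n - i := by omega

-- dp(i) of Source B: post-order recursion, 0 for out-of-range / None nodes.
def pvDpB (arr : List (Option Int)) (i : Nat) : Int :=
  if h : i < arr.length then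
    match arr.getD i none with
    | none => 0
    | some v =>
      let l := pvDpB arr (2 * i + 1)
      let r := pvDpB arr (2 * i + 2)
      v + (if l > 0 then l else 0) + (if r > 0 then r else 0)
  else 0
termination_by arr.length - i
decreasing_by
  · exact pvDec1 arr.length i h
  · exact pvDec2 arr.length i h

-- build(oi, ni) of Source B: DFS writing out[ni] = arr[oi], recursing into kept children.
def pvBuildB (arr : List (Option Int)) (oi ni : Nat) (out : PySem.Dict Nat (Option Int)) :
    PySem.Dict Nat (Option Int) :=
  let out1 := out.insert ni (arr.getD oi none)
  let out2 :=
    if h1 : 2 * oi + 1 < arr.length ∧ (arr.getD (2 * oi + 1) none).isSome = true ∧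
        pvDpB arr (2 * oi + 1) > 0 then
      pvBuildB arr (2 * oi + 1) (2 * ni + 1) out1
    else out1
  if h2 : 2 * oi + 2 < arr.length ∧ (arr.getD (2 * oi + 2) none).isSome = true ∧
      pvDpB arr (2 * oi + 2) > 0 then
    pvBuildB arr (2 * oi + 2) (2 * ni + 2) out2
  else out2
termination_by arr.length - oi
decreasing_by
  · exact pvDec1' arr.length oi h1.1
  · exact pvDec2' arr.length oi h2.1

def max_pruned_subtree_alt (arr : List (Option Int)) : List (Option Int) :=
  let n := arr.length
  let cands := ((List.range n).filter (fun i => (arr.getD i none).isSome)).map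
    (fun i => (pvDpB arr i, i))
  match cands with
  | [] => []
  | c :: cs =>
    -- best_sum, best_root = max(cands): Python's max keeps the lexicographically
    -- largest (value, index) pair, scanning left to right
    let best := cs.foldl (fun b p => if p.1 > b.1 ∨ (p.1 = b.1 ∧ p.2 > b.2) then p else b) c
    let out := pvBuildB arr best.2 0 PySem.Dict.empty
    match PySem.List.max? out.keys (fun k => k) with
    | none => []   -- unreachable: key 0 is always present
    | some m => (List.range (m + 1)).map (fun k => out.getD k none)

-- ===== PRECONDITION & SPEC =====
def Spec_max_pruned_subtree (arr : List (Option Int)) (out : List (Option Int)) : Prop := out = max_pruned_subtree_alt arr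
instance (arr : List (Option Int)) (out : List (Option Int)) : Decidable (Spec_max_pruned_subtree arr out) := by unfold Spec_max_pruned_subtree; infer_instance

-- ===== CLAIM (what is proved, stated in full; the proofs are below) =====
def Claim_equal_max_pruned_subtree : Prop := ∀ (arr : List (Option Int)), Dom_max_pruned_subtree arr → Spec_max_pruned_subtree arr (max_pruned_subtree arr)

-- ===== LEMMAS AND PROOFS =====

-- ---- generic helpers ----

-- getD through map isSome
lemma pvValid_getD (arr : List (Option Int)) (k : Nat) :
    (arr.map (fun x => x.isSome)).getD k false = (arr.getD k none).isSome := by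
  rcases Nat.lt_or_ge k arr.length with h | h
  · simp [List.getD_eq_getElem?_getD, List.getElem?_map, List.getElem?_eq_getElem h]
  · simp [List.getD_eq_getElem?_getD, List.getElem?_eq_none (by simpa using h),
      List.getElem?_map]

-- pvDpB is 0 outside the tree
lemma pvDpB_zero_of_out {arr : List (Option Int)} {i : Nat}
    (h : ¬ (i < arr.length ∧ (arr.getD i none).isSome = true)) : pvDpB arr i = 0 := by
  rw [pvDpB]
  by_cases hi : i < arr.length
  · cases hm : arr.getD i none with
    | none => simp [hi, hm]
    | some v => exact absurd ⟨hi, by rw [hm]; rfl⟩ h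
  · simp [hi]

lemma pvDpB_valid {arr : List (Option Int)} {i : Nat} {v : Int}
    (hi : i < arr.length) (hv : arr.getD i none = some v) :
    pvDpB arr i = v + (if pvDpB arr (2*i+1) > 0 then pvDpB arr (2*i+1) else 0)
      + (if pvDpB arr (2*i+2) > 0 then pvDpB arr (2*i+2) else 0) := by
  have hv' : arr[i] = some v := by
    rw [List.getD_eq_getElem?_getD, List.getElem?_eq_getElem hi] at hv; simpa using hv
  rw [pvDpB]; simp [hi, hv, hv']

-- ---- phase 1: the dp sweep ----

-- best state of A's loop after processing indices n-1 .. j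
def pvBestSpec (arr : List (Option Int)) (j : Nat) : Option Int × Int :=
  if h : j < arr.length then
    let prev := pvBestSpec arr (j+1)
    if (arr.getD j none).isSome then
      match prev.1 with
      | none => (some (pvDpB arr j), (j : Int))
      | some b => if pvDpB arr j > b then (some (pvDpB arr j), (j : Int)) else (some b, prev.2)
    else prev
  else (none, -1)
termination_by arr.length - j
decreasing_by
  exact Nat.sub_succ_lt_self arr.length j h

def pvInv (arr : List (Option Int)) (j : Nat) (s : List Int × Option Int × Int) : Prop :=
  s.1.length = arr.length ∧
  (∀ k : Nat, s.1.getD k 0 = if j ≤ k then pvDpB arr k else 0) ∧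
  s.2 = pvBestSpec arr j

lemma pvGetD_getElem (arr : List (Option Int)) (j : Nat) (hj : j < arr.length) :
    arr.getD j none = arr[j] := by
  rw [List.getD_eq_getElem?_getD, List.getElem?_eq_getElem hj]; rfl

lemma pvSet_getD (l : List Int) (i : Nat) (a : Int) (k : Nat) (hi : i < l.length) :
    (l.set i a).getD k 0 = if k = i then a else l.getD k 0 := by
  by_cases hk : k = i
  · subst hk; simp [List.getD_eq_getElem?_getD, List.getElem?_set_self hi]
  · rw [List.getD_eq_getElem?_getD, List.getD_eq_getElem?_getD,
      List.getElem?_set_ne (fun h => hk (by omega)), if_neg hk]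

lemma pvStepA_inv (arr : List (Option Int)) (j : Nat) (s : List Int × Option Int × Int)
    (hj : j < arr.length) (hs : pvInv arr (j+1) s) :
    pvInv arr j (pvStepA arr (arr.map (fun x => x.isSome)) s ((j : Nat) : Int)) := by
  obtain ⟨dp0, bs0, br0⟩ := s
  obtain ⟨hlen, hdp, hbest⟩ := hs
  simp only at hlen hdp hbest
  have ht0 : ((j : Int)).toNat = j := by omega
  have ht1 : (2 * (j : Int) + 1).toNat = 2 * j + 1 := by omega
  have ht2 : (2 * (j : Int) + 2).toNat = 2 * j + 2 := by omega
  simp only [pvStepA, ht0, ht1, ht2, pvValid_getD]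
  by_cases hv : (arr.getD j none).isSome = true
  · rw [if_neg (not_not_intro hv)]
    have hne : arr[j] ≠ none := by
      have hv' := hv; rw [pvGetD_getElem arr j hj] at hv'
      exact Option.isSome_iff_ne_none.mp hv'
    obtain ⟨v, hveq⟩ := Option.isSome_iff_exists.mp hv
    have hL : (if 2 * ((j : Nat) : Int) + 1 < (arr.length : Int) ∧
          (arr.getD (2*j+1) none).isSome = true then dp0.getD (2*j+1) 0 else 0)
        = pvDpB arr (2*j+1) := by
      split_ifs with h
      · rw [hdp, if_pos (by omega)]
      · refine (pvDpB_zero_of_out ?_).symm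
        rintro ⟨ha, hb⟩
        exact h ⟨by push_cast; omega, hb⟩
    have hR : (if 2 * ((j : Nat) : Int) + 2 < (arr.length : Int) ∧
          (arr.getD (2*j+2) none).isSome = true then dp0.getD (2*j+2) 0 else 0)
        = pvDpB arr (2*j+2) := by
      split_ifs with h
      · rw [hdp, if_pos (by omega)]
      · refine (pvDpB_zero_of_out ?_).symm
        rintro ⟨ha, hb⟩
        exact h ⟨by push_cast; omega, hb⟩
    rw [hL, hR, hveq]
    simp only [Option.getD_some]
    have hcur : (if pvDpB arr (2*j+2) > 0 then
          (if pvDpB arr (2*j+1) > 0 then v + pvDpB arr (2*j+1) else v) + pvDpB arr (2*j+2)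
        else (if pvDpB arr (2*j+1) > 0 then v + pvDpB arr (2*j+1) else v)) = pvDpB arr j := by
      rw [pvDpB_valid hj hveq]
      split_ifs <;> ring
    rw [hcur]
    have hlen' : (dp0.set j (pvDpB arr j)).length = arr.length := by simpa using hlen
    have hset : ∀ k : Nat, (dp0.set j (pvDpB arr j)).getD k 0
        = if j ≤ k then pvDpB arr k else 0 := by
      intro k
      rw [pvSet_getD _ _ _ _ (by omega)]
      split_ifs with h1 h2
      · subst h1; rfl
      · omega
      · rw [hdp]; split_ifs with h3 <;> first | rfl | omega
      · rw [hdp]; split_ifs with h3 <;> first | rfl | omega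
    rcases bs0 with _ | b
    · have hprev : pvBestSpec arr (j+1) = ((none : Option Int), br0) := hbest.symm
      refine ⟨hlen', hset, ?_⟩
      rw [pvBestSpec]
      simp [hj, hne, hprev]
    · have hprev : pvBestSpec arr (j+1) = (some b, br0) := hbest.symm
      show pvInv arr j (if pvDpB arr j > b then
          (dp0.set j (pvDpB arr j), some (pvDpB arr j), ((j : Nat) : Int))
        else (dp0.set j (pvDpB arr j), some b, br0))
      by_cases hc : pvDpB arr j > b
      · rw [if_pos hc]
        refine ⟨hlen', hset, ?_⟩
        rw [pvBestSpec]
        simp [hj, hne, hprev, hc]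
      · rw [if_neg hc]
        refine ⟨hlen', hset, ?_⟩
        rw [pvBestSpec]
        simp [hj, hne, hprev, hc]
  · rw [if_pos hv]
    have heq : arr[j] = none := by
      have hv' := hv; rw [pvGetD_getElem arr j hj] at hv'
      exact Option.not_isSome_iff_eq_none.mp hv'
    refine ⟨by simpa using hlen, ?_, ?_⟩
    · intro k
      show (dp0.set j 0).getD k 0 = _
      rw [pvSet_getD _ _ _ _ (by omega)]
      split_ifs with h1 h2
      · subst h1
        rw [pvDpB_zero_of_out (fun hh => hv hh.2)]
      · omega
      · rw [hdp]; split_ifs with h3 <;> first | rfl | omega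
      · rw [hdp]; split_ifs with h3 <;> first | rfl | omega
    · show ((bs0 : Option Int), (br0 : Int)) = _
      have hprev : pvBestSpec arr (j+1) = (bs0, br0) := hbest.symm
      rw [pvBestSpec]
      simp [hj, heq, hprev]

lemma pvFold_inv (arr : List (Option Int)) :
    pvInv arr 0 ((PySem.List.pyRange ((arr.length : Int) - 1) (-1) (-1)).foldl
      (pvStepA arr (arr.map (fun x => x.isSome)))
      (List.replicate arr.length 0, none, -1)) := by
  have base : pvInv arr arr.length (List.replicate arr.length 0, none, -1) := by
    refine ⟨by simp, ?_, ?_⟩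
    · intro k
      have hz : (List.replicate arr.length (0 : Int)).getD k 0 = 0 := by
        rw [List.getD_eq_getElem?_getD]
        rcases Nat.lt_or_ge k arr.length with h | h
        · rw [List.getElem?_replicate, if_pos h]; rfl
        · rw [List.getElem?_eq_none (by simpa using h)]; rfl
      rw [hz]
      split_ifs with h
      · exact (pvDpB_zero_of_out (fun hh => by omega)).symm
      · rfl
    · show ((none : Option Int), (-1 : Int)) = _
      rw [pvBestSpec, dif_neg (lt_irrefl _)]
  have aux : ∀ m : Nat, m ≤ arr.length →
      pvInv arr (arr.length - m)
        (((List.range m).map (fun k : Nat => (arr.length : Int) - 1 - (k : Int))).foldl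
          (pvStepA arr (arr.map (fun x => x.isSome)))
          (List.replicate arr.length 0, none, -1)) := by
    intro m
    induction m with
    | zero => intro _; simpa using base
    | succ m ih =>
      intro hm
      rw [List.range_succ, List.map_append, List.foldl_append]
      simp only [List.map_cons, List.map_nil, List.foldl_cons, List.foldl_nil]
      have hj : arr.length - (m+1) < arr.length := by omega
      have hcast : ((arr.length : Int) - 1 - (m : Int)) = ((arr.length - (m+1) : Nat) : Int) := by
        push_cast
        omega
      rw [hcast]
      have hprev := ih (by omega)
      have h2 : arr.length - m = arr.length - (m+1) + 1 := by omega
      rw [h2] at hprev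
      exact pvStepA_inv arr (arr.length - (m+1)) _ hj hprev
  have hrange : PySem.List.pyRange ((arr.length : Int) - 1) (-1) (-1)
      = (List.range arr.length).map (fun k : Nat => (arr.length : Int) - 1 - (k : Int)) := by
    rw [PySem.List.pyRange_neg_one]
    have hcnt : ((arr.length : Int) - 1 - (-1)).toNat = arr.length := by omega
    rw [hcnt]
  rw [hrange]
  have hfin := aux arr.length le_rfl
  simpa using hfin

-- characterisation of pvBestSpec
lemma pvBestSpec_char (arr : List (Option Int)) (j : Nat) :
    (pvBestSpec arr j = ((none : Option Int), (-1 : Int)) ∧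
      ∀ k : Nat, j ≤ k → k < arr.length → (arr.getD k none).isSome = false) ∨
    (∃ r : Nat, pvBestSpec arr j = (some (pvDpB arr r), (r : Int)) ∧ j ≤ r ∧ r < arr.length ∧
      (arr.getD r none).isSome = true ∧
      ∀ k : Nat, j ≤ k → k < arr.length → (arr.getD k none).isSome = true →
        (pvDpB arr k < pvDpB arr r ∨ (pvDpB arr k = pvDpB arr r ∧ k ≤ r))) := by
  have main : ∀ (d j : Nat), arr.length - j ≤ d →
      (pvBestSpec arr j = ((none : Option Int), (-1 : Int)) ∧
        ∀ k : Nat, j ≤ k → k < arr.length → (arr.getD k none).isSome = false) ∨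
      (∃ r : Nat, pvBestSpec arr j = (some (pvDpB arr r), (r : Int)) ∧ j ≤ r ∧ r < arr.length ∧
        (arr.getD r none).isSome = true ∧
        ∀ k : Nat, j ≤ k → k < arr.length → (arr.getD k none).isSome = true →
          (pvDpB arr k < pvDpB arr r ∨ (pvDpB arr k = pvDpB arr r ∧ k ≤ r))) := by
    intro d
    induction d with
    | zero =>
      intro j hd
      left
      refine ⟨by rw [pvBestSpec, dif_neg (by omega)], ?_⟩
      intro k hk1 hk2; omega
    | succ d ih =>
      intro j hd
      by_cases hj : j < arr.length
      · rcases ih (j+1) (by omega) with ⟨hprev, hall⟩ | ⟨r, hprev, hr1, hr2, hr3, hdom⟩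
        · by_cases hv : (arr.getD j none).isSome = true
          · have hne : arr[j] ≠ none := by
              have hv' := hv; rw [pvGetD_getElem arr j hj] at hv'
              exact Option.isSome_iff_ne_none.mp hv'
            right
            refine ⟨j, ?_, le_rfl, hj, hv, ?_⟩
            · rw [pvBestSpec]; simp [hj, hne, hprev]
            · intro k hk1 hk2 hk3
              rcases Nat.eq_or_lt_of_le hk1 with rfl | hlt
              · right; exact ⟨rfl, le_rfl⟩
              · rw [hall k (by omega) hk2] at hk3; simp at hk3
          · have heq : arr[j] = none := by
              have hv' := hv; rw [pvGetD_getElem arr j hj] at hv'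
              exact Option.not_isSome_iff_eq_none.mp hv'
            left
            refine ⟨?_, ?_⟩
            · rw [pvBestSpec]; simp [hj, heq, hprev]
            · intro k hk1 hk2
              rcases Nat.eq_or_lt_of_le hk1 with rfl | hlt
              · simpa using hv
              · exact hall k (by omega) hk2
        · by_cases hv : (arr.getD j none).isSome = true
          · have hne : arr[j] ≠ none := by
              have hv' := hv; rw [pvGetD_getElem arr j hj] at hv'
              exact Option.isSome_iff_ne_none.mp hv'
            by_cases hgt : pvDpB arr j > pvDpB arr r
            · right
              refine ⟨j, ?_, le_rfl, hj, hv, ?_⟩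
              · rw [pvBestSpec]; simp [hj, hne, hprev, hgt]
              · intro k hk1 hk2 hk3
                rcases Nat.eq_or_lt_of_le hk1 with rfl | hlt
                · right; exact ⟨rfl, le_rfl⟩
                · left
                  rcases hdom k (by omega) hk2 hk3 with h | ⟨h, _⟩ <;> omega
            · right
              refine ⟨r, ?_, by omega, hr2, hr3, ?_⟩
              · rw [pvBestSpec]; simp [hj, hne, hprev, hgt]
              · intro k hk1 hk2 hk3
                rcases Nat.eq_or_lt_of_le hk1 with rfl | hlt
                · rcases lt_or_eq_of_le (not_lt.mp hgt) with h | h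
                  · exact Or.inl h
                  · exact Or.inr ⟨h, by omega⟩
                · exact hdom k (by omega) hk2 hk3
          · have heq : arr[j] = none := by
              have hv' := hv; rw [pvGetD_getElem arr j hj] at hv'
              exact Option.not_isSome_iff_eq_none.mp hv'
            right
            refine ⟨r, ?_, by omega, hr2, hr3, ?_⟩
            · rw [pvBestSpec]; simp [hj, heq, hprev]
            · intro k hk1 hk2 hk3
              rcases Nat.eq_or_lt_of_le hk1 with rfl | hlt
              · exact absurd hk3 (by simpa using hv)
              · exact hdom k (by omega) hk2 hk3
      · left
        refine ⟨by rw [pvBestSpec, dif_neg hj], ?_⟩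
        intro k hk1 hk2; omega
  exact main (arr.length - j) j le_rfl

-- B's max(cands) fold: result is in the list and lexicographically dominates it
def pvLexLe (p b : Int × Nat) : Prop := p.1 < b.1 ∨ (p.1 = b.1 ∧ p.2 ≤ b.2)

lemma pvLexLe_refl (p : Int × Nat) : pvLexLe p p := Or.inr ⟨rfl, le_rfl⟩

lemma pvLexLe_trans {a b c : Int × Nat} (h1 : pvLexLe a b) (h2 : pvLexLe b c) : pvLexLe a c := by
  rcases h1 with h1 | ⟨h1, h1'⟩ <;> rcases h2 with h2 | ⟨h2, h2'⟩ <;>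
    unfold pvLexLe <;> [skip; skip; skip; skip] <;>
    first
      | exact Or.inl (by omega)
      | exact Or.inr ⟨by omega, by omega⟩

lemma pvFoldMax_char (cs : List (Int × Nat)) (c : Int × Nat) :
    (cs.foldl (fun b p => if p.1 > b.1 ∨ (p.1 = b.1 ∧ p.2 > b.2) then p else b) c) ∈ c :: cs ∧
    ∀ p ∈ c :: cs,
      pvLexLe p (cs.foldl (fun b p => if p.1 > b.1 ∨ (p.1 = b.1 ∧ p.2 > b.2) then p else b) c) := by
  induction cs generalizing c with
  | nil =>
    refine ⟨List.mem_cons_self, ?_⟩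
    intro p hp
    rw [List.mem_singleton] at hp
    subst hp
    exact pvLexLe_refl p
  | cons q t ih =>
    simp only [List.foldl_cons]
    obtain ⟨hmem, hdom⟩ := ih (if q.1 > c.1 ∨ (q.1 = c.1 ∧ q.2 > c.2) then q else c)
    have hstep_mem : (if q.1 > c.1 ∨ (q.1 = c.1 ∧ q.2 > c.2) then q else c) ∈ c :: q :: t := by
      split_ifs
      · exact List.mem_cons_of_mem _ List.mem_cons_self
      · exact List.mem_cons_self
    have hc : pvLexLe c (if q.1 > c.1 ∨ (q.1 = c.1 ∧ q.2 > c.2) then q else c) := by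
      split_ifs with h
      · rcases h with h | h
        · exact Or.inl h
        · exact Or.inr ⟨h.1.symm, le_of_lt h.2⟩
      · exact pvLexLe_refl c
    have hq : pvLexLe q (if q.1 > c.1 ∨ (q.1 = c.1 ∧ q.2 > c.2) then q else c) := by
      split_ifs with h
      · exact pvLexLe_refl q
      · have h1 : ¬ q.1 > c.1 := fun hh => h (Or.inl hh)
        have h2 : ¬ (q.1 = c.1 ∧ q.2 > c.2) := fun hh => h (Or.inr hh)
        rcases lt_trichotomy q.1 c.1 with hlt | heq | hgt
        · exact Or.inl hlt
        · refine Or.inr ⟨heq, ?_⟩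
          by_contra hq2
          exact h2 ⟨heq, by omega⟩
        · exact absurd hgt h1
    refine ⟨?_, ?_⟩
    · rcases List.mem_cons.mp hmem with h | h
      · rw [h]; exact hstep_mem
      · exact List.mem_cons_of_mem _ (List.mem_cons_of_mem _ h)
    · intro p hp
      rcases List.mem_cons.mp hp with rfl | hp'
      · exact pvLexLe_trans hc (hdom _ List.mem_cons_self)
      · rcases List.mem_cons.mp hp' with rfl | hp''
        · exact pvLexLe_trans hq (hdom _ List.mem_cons_self)
        · exact hdom p (List.mem_cons_of_mem _ hp'')

-- ---- phase 2: reconstruction ----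

-- the pre-order list of (original index, new index) pairs of the kept subtree
def pvPairs (arr : List (Option Int)) (oi ni : Nat) : List (Nat × Nat) :=
  (oi, ni) ::
    ((if h : 2*oi+1 < arr.length ∧ (arr.getD (2*oi+1) none).isSome = true ∧
          pvDpB arr (2*oi+1) > 0 then
        pvPairs arr (2*oi+1) (2*ni+1) else []) ++
     (if h : 2*oi+2 < arr.length ∧ (arr.getD (2*oi+2) none).isSome = true ∧
          pvDpB arr (2*oi+2) > 0 then
        pvPairs arr (2*oi+2) (2*ni+2) else []))
termination_by arr.length - oi
decreasing_by
  · exact pvDec1' arr.length oi (by assumption : 2*oi+1 < arr.length ∧ _ ∧ _).1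
  · exact pvDec2' arr.length oi (by assumption : 2*oi+2 < arr.length ∧ _ ∧ _).1

-- one pad-and-write step of A's BFS loop
def pvWrite (arr : List (Option Int)) (res : List (Option Int)) (p : Nat × Nat) :
    List (Option Int) :=
  (res ++ List.replicate (p.2 + 1 - res.length) (none : Option Int)).set p.2 (arr.getD p.1 none)

lemma pvWrite_length (arr : List (Option Int)) (res : List (Option Int)) (p : Nat × Nat) :
    (pvWrite arr res p).length = max res.length (p.2 + 1) := by
  simp [pvWrite]; omega

lemma pvWrite_getD (arr : List (Option Int)) (res : List (Option Int)) (p : Nat × Nat) (j : Nat) :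
    (pvWrite arr res p).getD j none =
      if j = p.2 then arr.getD p.1 none else res.getD j none := by
  simp only [pvWrite]
  have hlen : p.2 < (res ++ List.replicate (p.2 + 1 - res.length) (none : Option Int)).length := by
    simp; omega
  by_cases hj : j = p.2
  · subst hj
    simp [List.getD_eq_getElem?_getD, List.getElem?_set_self hlen]
  · rw [List.getD_eq_getElem?_getD, List.getElem?_set_ne (fun h => hj (by omega))]
    by_cases hr : j < res.length
    · simp [List.getElem?_append_left hr, List.getD_eq_getElem?_getD, hj]
    · have hr' : res.length ≤ j := le_of_not_gt hr
      rw [List.getElem?_append_right hr', if_neg hj]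
      have hres : res[j]? = none := List.getElem?_eq_none hr'
      cases h : (List.replicate (p.2 + 1 - res.length) (none : Option Int))[j - res.length]? with
      | none => simp [List.getD_eq_getElem?_getD, h, hres]
      | some v =>
        have hv : v = none :=
          List.eq_of_mem_replicate (List.mem_of_getElem? h)
        subst hv
        simp [List.getD_eq_getElem?_getD, h, hres]

-- the BFS loop is a fold of pvWrite over some permutation of the pre-order pairs
lemma pvBfsA_perm (arr : List (Option Int)) (dp : List Int)
    (hd : ∀ k : Nat, dp.getD k 0 = pvDpB arr k) :
    ∀ (q : List (Nat × Nat)) (res : List (Option Int)),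
    ∃ L : List (Nat × Nat),
      L.Perm (q.flatMap (fun p => pvPairs arr p.1 p.2)) ∧
      pvBfsA arr (arr.map (fun x => x.isSome)) dp q res = L.foldl (pvWrite arr) res := by
  intro q res
  generalize hM : (q.map (fun p => 3 ^ (arr.length + 1 - p.1))).sum = M
  induction M using Nat.strong_induction_on generalizing q res with
  | _ M ihM =>
  cases q with
  | nil => exact ⟨[], by simp, by rw [pvBfsA]; rfl⟩
  | cons p rest =>
    obtain ⟨oi, ni⟩ := p
    have hq1lt : (((rest
        ++ (if 2*oi+1 < arr.length ∧ (arr.map (fun x => x.isSome)).getD (2*oi+1) false = true ∧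
              dp.getD (2*oi+1) 0 > 0 then [(2*oi+1, 2*ni+1)] else [])
        ++ (if 2*oi+2 < arr.length ∧ (arr.map (fun x => x.isSome)).getD (2*oi+2) false = true ∧
              dp.getD (2*oi+2) 0 > 0 then [(2*oi+2, 2*ni+2)] else [])).map
          (fun p => 3 ^ (arr.length + 1 - p.1))).sum) < M := by
      rw [← hM]
      simp only [List.map_append, List.sum_append, List.map_cons, List.sum_cons]
      have h3 : ∀ m : Nat, (0:Nat) < 3 ^ m := fun _ => Nat.pow_pos (by norm_num)
      split_ifs with hl hr hr <;>
        simp only [List.map_cons, List.map_nil, List.sum_cons, List.sum_nil] <;>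
      [ (have hoi : oi < arr.length := by omega
         have e1 : 3 ^ (arr.length + 1 - (2 * oi + 1)) ≤ 3 ^ (arr.length - oi) :=
           Nat.pow_le_pow_right (by norm_num) (by omega)
         have e2 : 3 ^ (arr.length + 1 - (2 * oi + 2)) ≤ 3 ^ (arr.length - oi) :=
           Nat.pow_le_pow_right (by norm_num) (by omega)
         have e3 : arr.length + 1 - oi = (arr.length - oi) + 1 := by omega
         rw [e3, pow_succ]
         have := h3 (arr.length - oi); omega);
        (have hoi : oi < arr.length := by omega
         have e1 : 3 ^ (arr.length + 1 - (2 * oi + 1)) ≤ 3 ^ (arr.length - oi) :=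
           Nat.pow_le_pow_right (by norm_num) (by omega)
         have e3 : arr.length + 1 - oi = (arr.length - oi) + 1 := by omega
         rw [e3, pow_succ]
         have := h3 (arr.length - oi); omega);
        (have hoi : oi < arr.length := by omega
         have e2 : 3 ^ (arr.length + 1 - (2 * oi + 2)) ≤ 3 ^ (arr.length - oi) :=
           Nat.pow_le_pow_right (by norm_num) (by omega)
         have e3 : arr.length + 1 - oi = (arr.length - oi) + 1 := by omega
         rw [e3, pow_succ]
         have := h3 (arr.length - oi); omega);
        (have := h3 (arr.length + 1 - oi); omega) ]
    obtain ⟨L', hperm, heq⟩ := ihM _ hq1lt _ (pvWrite arr res (oi, ni)) rfl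
    refine ⟨(oi, ni) :: L', ?_, ?_⟩
    · have e1 : (if 2*oi+1 < arr.length ∧
            (arr.map (fun x => x.isSome)).getD (2*oi+1) false = true ∧
            dp.getD (2*oi+1) 0 > 0 then [(2*oi+1, 2*ni+1)] else [])
          = (if 2*oi+1 < arr.length ∧ (arr.getD (2*oi+1) none).isSome = true ∧
            pvDpB arr (2*oi+1) > 0 then [(2*oi+1, 2*ni+1)] else []) := by
        rw [pvValid_getD, hd]
      have e2 : (if 2*oi+2 < arr.length ∧
            (arr.map (fun x => x.isSome)).getD (2*oi+2) false = true ∧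
            dp.getD (2*oi+2) 0 > 0 then [(2*oi+2, 2*ni+2)] else [])
          = (if 2*oi+2 < arr.length ∧ (arr.getD (2*oi+2) none).isSome = true ∧
            pvDpB arr (2*oi+2) > 0 then [(2*oi+2, 2*ni+2)] else []) := by
        rw [pvValid_getD, hd]
      rw [e1, e2] at hperm
      have hflat : ∀ (c : Prop) [Decidable c] (x : Nat × Nat),
          ((if c then [x] else []).flatMap (fun p => pvPairs arr p.1 p.2))
            = (if c then pvPairs arr x.1 x.2 else []) := by
        intro c _ x
        split_ifs <;> simp
      rw [List.flatMap_append, List.flatMap_append, hflat, hflat] at hperm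
      rw [List.flatMap_cons, pvPairs, List.cons_append]
      refine List.Perm.cons _ ?_
      refine hperm.trans ?_
      have hd1 : (if h : 2*oi+1 < arr.length ∧ (arr.getD (2*oi+1) none).isSome = true ∧
            pvDpB arr (2*oi+1) > 0 then pvPairs arr (2*oi+1) (2*ni+1) else [])
          = (if 2*oi+1 < arr.length ∧ (arr.getD (2*oi+1) none).isSome = true ∧
            pvDpB arr (2*oi+1) > 0 then pvPairs arr (2*oi+1) (2*ni+1) else []) := dite_eq_ite ..
      have hd2 : (if h : 2*oi+2 < arr.length ∧ (arr.getD (2*oi+2) none).isSome = true ∧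
            pvDpB arr (2*oi+2) > 0 then pvPairs arr (2*oi+2) (2*ni+2) else [])
          = (if 2*oi+2 < arr.length ∧ (arr.getD (2*oi+2) none).isSome = true ∧
            pvDpB arr (2*oi+2) > 0 then pvPairs arr (2*oi+2) (2*ni+2) else []) := dite_eq_ite ..
      rw [hd1, hd2, List.append_assoc]
      exact List.perm_append_comm
    · rw [pvBfsA, List.foldl_cons]
      exact heq

-- ---- uniqueness of new indices ----

def pvFollow (s : Nat) (p : List Bool) : Nat :=
  p.foldl (fun m b => 2 * m + 1 + (if b then 1 else 0)) s

def pvInSub (s k : Nat) : Prop := ∃ p, pvFollow s p = k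

lemma pvFollow_ge (p : List Bool) : ∀ s : Nat, s ≤ pvFollow s p := by
  induction p with
  | nil => intro s; simp [pvFollow]
  | cons b t ih =>
    intro s
    have := ih (2 * s + 1 + (if b then 1 else 0))
    simp only [pvFollow, List.foldl_cons] at *
    omega

lemma pvInSub_ge {s k : Nat} (h : pvInSub s k) : s ≤ k := by
  obtain ⟨p, hp⟩ := h; rw [← hp]; exact pvFollow_ge p s

lemma pvInSub_last {s k : Nat} (h : pvInSub s k) :
    k = s ∨ ∃ j, pvInSub s j ∧ (k = 2*j+1 ∨ k = 2*j+2) := by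
  obtain ⟨p, hp⟩ := h
  rcases List.eq_nil_or_concat p with rfl | ⟨q, b, rfl⟩
  · left; simpa [pvFollow] using hp.symm
  · right
    refine ⟨pvFollow s q, ⟨q, rfl⟩, ?_⟩
    rw [List.concat_eq_append] at hp
    rw [pvFollow, List.foldl_append] at hp
    simp only [List.foldl_cons, List.foldl_nil] at hp
    cases b
    · left; simpa [pvFollow] using hp.symm
    · right; simpa [pvFollow] using hp.symm

lemma pvInSub_left {n k : Nat} (h : pvInSub (2*n+1) k) : pvInSub n k := by
  obtain ⟨p, hp⟩ := h
  exact ⟨false :: p, by simpa [pvFollow] using hp⟩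

lemma pvInSub_right {n k : Nat} (h : pvInSub (2*n+2) k) : pvInSub n k := by
  obtain ⟨p, hp⟩ := h
  refine ⟨true :: p, ?_⟩
  simpa [pvFollow, show 2*n+1+1 = 2*n+2 by omega] using hp

lemma pvSub_disjoint (m : Nat) : ∀ k, pvInSub (2*m+1) k → pvInSub (2*m+2) k → False := by
  intro k
  induction k using Nat.strong_induction_on with
  | _ k ih =>
    intro h1 h2
    rcases pvInSub_last h1 with rfl | ⟨j1, hj1, hk1⟩
    · have := pvInSub_ge h2; omega
    · rcases pvInSub_last h2 with rfl | ⟨j2, hj2, hk2⟩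
      · have g1 := pvInSub_ge hj1; omega
      · have g1 := pvInSub_ge hj1
        have g2 := pvInSub_ge hj2
        have hj : j1 = j2 := by omega
        subst hj
        exact ih j1 (by omega) hj1 hj2

lemma pvPairs_sub_aux (arr : List (Option Int)) :
    ∀ (d oi ni : Nat), arr.length - oi ≤ d → ∀ p ∈ pvPairs arr oi ni, pvInSub ni p.2 := by
  intro d
  induction d with
  | zero =>
    intro oi ni hd p hp
    rw [pvPairs] at hp
    rw [dif_neg (by omega), dif_neg (by omega)] at hp
    simp only [List.append_nil, List.mem_singleton] at hp
    subst hp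
    exact ⟨[], rfl⟩
  | succ d ih =>
    intro oi ni hd p hp
    rw [pvPairs] at hp
    rcases List.mem_cons.mp hp with rfl | hp'
    · exact ⟨[], rfl⟩
    · rcases List.mem_append.mp hp' with hl | hr
      · by_cases hc : 2*oi+1 < arr.length ∧ (arr.getD (2*oi+1) none).isSome = true ∧
            pvDpB arr (2*oi+1) > 0
        · rw [dif_pos hc] at hl
          exact pvInSub_left (ih (2*oi+1) (2*ni+1) (by omega) p hl)
        · rw [dif_neg hc] at hl; cases hl
      · by_cases hc : 2*oi+2 < arr.length ∧ (arr.getD (2*oi+2) none).isSome = true ∧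
            pvDpB arr (2*oi+2) > 0
        · rw [dif_pos hc] at hr
          exact pvInSub_right (ih (2*oi+2) (2*ni+2) (by omega) p hr)
        · rw [dif_neg hc] at hr; cases hr

lemma pvPairs_sub {arr : List (Option Int)} {oi ni : Nat} {p : Nat × Nat}
    (h : p ∈ pvPairs arr oi ni) : pvInSub ni p.2 :=
  pvPairs_sub_aux arr (arr.length - oi) oi ni le_rfl p h

lemma pvPairs_unique_aux (arr : List (Option Int)) :
    ∀ (d oi ni o1 o2 k : Nat), arr.length - oi ≤ d →
      (o1, k) ∈ pvPairs arr oi ni → (o2, k) ∈ pvPairs arr oi ni → o1 = o2 := by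
  intro d
  induction d with
  | zero =>
    intro oi ni o1 o2 k hd h1 h2
    rw [pvPairs, dif_neg (by omega), dif_neg (by omega)] at h1 h2
    simp only [List.append_nil, List.mem_singleton, Prod.mk.injEq] at h1 h2
    omega
  | succ d ih =>
    intro oi ni o1 o2 k hd h1 h2
    rw [pvPairs] at h1 h2
    have sub1 : ∀ o j, (o, j) ∈ (if h : 2*oi+1 < arr.length ∧ (arr.getD (2*oi+1) none).isSome = true ∧
          pvDpB arr (2*oi+1) > 0 then pvPairs arr (2*oi+1) (2*ni+1) else []) → pvInSub (2*ni+1) j := by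
      intro o j hj
      split at hj
      · exact pvPairs_sub hj
      · cases hj
    have sub2 : ∀ o j, (o, j) ∈ (if h : 2*oi+2 < arr.length ∧ (arr.getD (2*oi+2) none).isSome = true ∧
          pvDpB arr (2*oi+2) > 0 then pvPairs arr (2*oi+2) (2*ni+2) else []) → pvInSub (2*ni+2) j := by
      intro o j hj
      split at hj
      · exact pvPairs_sub hj
      · cases hj
    rcases List.mem_cons.mp h1 with he1 | h1'
    · rcases List.mem_cons.mp h2 with he2 | h2'
      · rw [Prod.mk.injEq] at he1 he2; omega
      · exfalso
        have hk : k = ni := (Prod.mk.injEq .. |>.mp he1).2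
        rcases List.mem_append.mp h2' with hl | hr
        · have := pvInSub_ge (sub1 _ _ hl); omega
        · have := pvInSub_ge (sub2 _ _ hr); omega
    · rcases List.mem_cons.mp h2 with he2 | h2'
      · exfalso
        have hk : k = ni := (Prod.mk.injEq .. |>.mp he2).2
        rcases List.mem_append.mp h1' with hl | hr
        · have := pvInSub_ge (sub1 _ _ hl); omega
        · have := pvInSub_ge (sub2 _ _ hr); omega
      · rcases List.mem_append.mp h1' with hl1 | hr1 <;>
          rcases List.mem_append.mp h2' with hl2 | hr2
        · split at hl1
          · rw [dif_pos (by assumption)] at hl2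
            exact ih (2*oi+1) (2*ni+1) o1 o2 k (by omega) hl1 hl2
          · cases hl1
        · exact absurd (pvSub_disjoint ni k (sub1 _ _ hl1) (sub2 _ _ hr2)) (fun h => h)
        · exact absurd (pvSub_disjoint ni k (sub1 _ _ hl2) (sub2 _ _ hr1)) (fun h => h)
        · split at hr1
          · rw [dif_pos (by assumption)] at hr2
            exact ih (2*oi+2) (2*ni+2) o1 o2 k (by omega) hr1 hr2
          · cases hr1

lemma pvPairs_unique {arr : List (Option Int)} {oi ni o1 o2 k : Nat}
    (h1 : (o1, k) ∈ pvPairs arr oi ni) (h2 : (o2, k) ∈ pvPairs arr oi ni) : o1 = o2 :=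
  pvPairs_unique_aux arr (arr.length - oi) oi ni o1 o2 k le_rfl h1 h2

-- ---- B's build and render ----

lemma pvBuildB_eq_foldl (arr : List (Option Int)) :
    ∀ (oi ni : Nat) (out : PySem.Dict Nat (Option Int)),
    pvBuildB arr oi ni out =
      (pvPairs arr oi ni).foldl (fun d p => d.insert p.2 (arr.getD p.1 none)) out := by
  have main : ∀ (d oi ni : Nat) (out : PySem.Dict Nat (Option Int)), arr.length - oi ≤ d →
      pvBuildB arr oi ni out =
        (pvPairs arr oi ni).foldl (fun d p => d.insert p.2 (arr.getD p.1 none)) out := by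
    intro d
    induction d with
    | zero =>
      intro oi ni out hd
      rw [pvBuildB, pvPairs, dif_neg (by omega), dif_neg (by omega), dif_neg (by omega),
        dif_neg (by omega)]
      simp
    | succ d ih =>
      intro oi ni out hd
      rw [pvBuildB, pvPairs]
      simp only [List.foldl_cons, List.foldl_append]
      by_cases h1 : 2*oi+1 < arr.length ∧ (arr.getD (2*oi+1) none).isSome = true ∧
          pvDpB arr (2*oi+1) > 0 <;>
        by_cases h2 : 2*oi+2 < arr.length ∧ (arr.getD (2*oi+2) none).isSome = true ∧
          pvDpB arr (2*oi+2) > 0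
      · rw [dif_pos h1, dif_pos h2, dif_pos h1, dif_pos h2,
          ih (2*oi+1) (2*ni+1) _ (by omega), ih (2*oi+2) (2*ni+2) _ (by omega)]
      · rw [dif_pos h1, dif_neg h2, dif_pos h1, dif_neg h2, ih (2*oi+1) (2*ni+1) _ (by omega)]
        simp
      · rw [dif_neg h1, dif_pos h2, dif_neg h1, dif_pos h2, ih (2*oi+2) (2*ni+2) _ (by omega)]
        simp
      · rw [dif_neg h1, dif_neg h2, dif_neg h1, dif_neg h2]
        simp
  intro oi ni out
  exact main (arr.length - oi) oi ni out le_rfl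

-- the writes fold and the dict fold agree pointwise
lemma pvFold_getD_eq (arr : List (Option Int)) (L : List (Nat × Nat)) (j : Nat) :
    (L.foldl (pvWrite arr) []).getD j none =
      (L.foldl (fun d p => d.insert p.2 (arr.getD p.1 none))
        (PySem.Dict.empty : PySem.Dict Nat (Option Int))).getD j none := by
  induction L using List.reverseRecOn with
  | nil => simp [PySem.Dict.getD_empty]
  | append_singleton L p ih =>
    rw [List.foldl_append, List.foldl_append]
    simp only [List.foldl_cons, List.foldl_nil]
    rw [pvWrite_getD, PySem.Dict.getD_insert]
    split_ifs with h
    · rfl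
    · exact ih

lemma pvFold_length (arr : List (Option Int)) (L : List (Nat × Nat)) :
    (L.foldl (pvWrite arr) []).length = (L.map (fun p => p.2 + 1)).foldl max 0 := by
  induction L using List.reverseRecOn with
  | nil => simp
  | append_singleton L p ih =>
    rw [List.foldl_append, List.map_append, List.foldl_append]
    simp only [List.foldl_cons, List.foldl_nil, List.map_cons, List.map_nil]
    rw [pvWrite_length, ih]

lemma pvFold_mem_keys (arr : List (Option Int)) (L : List (Nat × Nat)) (j : Nat) :
    (j ∈ (L.foldl (fun d p => d.insert p.2 (arr.getD p.1 none))
        (PySem.Dict.empty : PySem.Dict Nat (Option Int))).keys) ↔ j ∈ L.map (fun p => p.2) := by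
  induction L using List.reverseRecOn with
  | nil => simp [PySem.Dict.keys_empty]
  | append_singleton L p ih =>
    rw [List.foldl_append, List.map_append]
    simp only [List.foldl_cons, List.foldl_nil, List.map_cons, List.map_nil]
    rw [PySem.Dict.mem_keys_insert, ih, List.mem_append, List.mem_singleton]
    tauto

lemma pvWrite_comm (arr : List (Option Int)) (z : List (Option Int)) (x y : Nat × Nat)
    (hne : x.2 ≠ y.2) :
    pvWrite arr (pvWrite arr z x) y = pvWrite arr (pvWrite arr z y) x := by
  have hget : ∀ (l : List (Option Int)) (i : Nat), i < l.length → l[i]! = l.getD i none := by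
    intro l i hi
    rw [List.getD_eq_getElem?_getD, List.getElem?_eq_getElem hi, getElem!_pos l i hi]
    rfl
  apply List.ext_getElem
  · rw [pvWrite_length, pvWrite_length, pvWrite_length, pvWrite_length]
    omega
  · intro i h1 h2
    have g1 : (pvWrite arr (pvWrite arr z x) y)[i] = (pvWrite arr (pvWrite arr z x) y).getD i none := by
      rw [List.getD_eq_getElem?_getD, List.getElem?_eq_getElem h1]; rfl
    have g2 : (pvWrite arr (pvWrite arr z y) x)[i] = (pvWrite arr (pvWrite arr z y) x).getD i none := by
      rw [List.getD_eq_getElem?_getD, List.getElem?_eq_getElem h2]; rfl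
    rw [g1, g2, pvWrite_getD, pvWrite_getD, pvWrite_getD, pvWrite_getD]
    split_ifs <;> first | rfl | (exact absurd (by omega : x.2 = y.2) hne)

lemma pvCands_mem (arr : List (Option Int)) (p : Int × Nat) :
    p ∈ ((List.range arr.length).filter (fun i => (arr.getD i none).isSome)).map
      (fun i => (pvDpB arr i, i)) ↔
    (p.2 < arr.length ∧ (arr.getD p.2 none).isSome = true ∧ p.1 = pvDpB arr p.2) := by
  constructor
  · intro hp
    obtain ⟨i, hi, rfl⟩ := List.mem_map.mp hp
    obtain ⟨hir, hif⟩ := List.mem_filter.mp hi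
    exact ⟨List.mem_range.mp hir, hif, rfl⟩
  · rintro ⟨h1, h2, h3⟩
    refine List.mem_map.mpr ⟨p.2, List.mem_filter.mpr ⟨List.mem_range.mpr h1, h2⟩, ?_⟩
    rw [← h3]

-- ===== VERDICT (by name: the statement is the Claim_ definition above) =====
theorem max_pruned_subtree_spec : Claim_equal_max_pruned_subtree := by
  intro arr _
  show max_pruned_subtree arr = max_pruned_subtree_alt arr
  by_cases h0 : arr.length = 0
  · have harr : arr = [] := List.length_eq_zero_iff.mp h0
    subst harr
    rfl
  · rw [max_pruned_subtree]
    simp only []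
    rw [if_neg h0]
    obtain ⟨hlen, hdp, hbest⟩ := pvFold_inv arr
    rw [hbest]
    have hd : ∀ k : Nat,
        ((PySem.List.pyRange ((arr.length : Int) - 1) (-1) (-1)).foldl
          (pvStepA arr (arr.map (fun x => x.isSome)))
          (List.replicate arr.length 0, none, -1)).1.getD k 0 = pvDpB arr k := by
      intro k
      have := hdp k
      simpa using this
    rcases pvBestSpec_char arr 0 with ⟨hspec, hall⟩ | ⟨r, hspec, _, hr2, hr3, hdom⟩
    · rw [hspec]
      rw [if_pos rfl]
      rw [max_pruned_subtree_alt]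
      have hfil : (List.range arr.length).filter (fun i => (arr.getD i none).isSome) = [] := by
        refine List.filter_eq_nil_iff.mpr ?_
        intro i hi
        rw [hall i (Nat.zero_le i) (List.mem_range.mp hi)]
        simp
      rw [hfil]
      rfl
    · rw [hspec]
      rw [if_neg (by omega)]
      have htr : ((r : Int)).toNat = r := by omega
      rw [htr]
      -- A side: BFS = fold of writes over the pre-order pairs
      obtain ⟨L, hperm, heq⟩ := pvBfsA_perm arr _ hd [(r, 0)] []
      rw [heq]
      simp only [List.flatMap_cons, List.flatMap_nil, List.append_nil] at hperm
      have hcomm : ∀ x ∈ L, ∀ y ∈ L, ∀ z,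
          pvWrite arr (pvWrite arr z x) y = pvWrite arr (pvWrite arr z y) x := by
        intro x hx y hy z
        by_cases hxy : x.2 = y.2
        · have hx' := hperm.mem_iff.mp hx
          have hy' := hperm.mem_iff.mp hy
          obtain ⟨x1, x2⟩ := x
          obtain ⟨y1, y2⟩ := y
          simp only at hxy
          subst hxy
          have : x1 = y1 := pvPairs_unique hx' hy'
          subst this
          rfl
        · exact pvWrite_comm arr z x y hxy
      rw [hperm.foldl_eq' hcomm []]
      -- B side
      rw [max_pruned_subtree_alt]
      simp only []
      -- candidates are nonempty: r is one of them
      have hrmem : ((pvDpB arr r, r) : Int × Nat) ∈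
          ((List.range arr.length).filter (fun i => (arr.getD i none).isSome)).map
            (fun i => (pvDpB arr i, i)) :=
        (pvCands_mem arr _).mpr ⟨hr2, hr3, rfl⟩
      rcases hc : ((List.range arr.length).filter (fun i => (arr.getD i none).isSome)).map
          (fun i => (pvDpB arr i, i)) with _ | ⟨c, cs⟩
      · rw [hc] at hrmem; cases hrmem
      · obtain ⟨hbmem, hbdom⟩ := pvFoldMax_char cs c
        rw [← hc] at hbmem hbdom
        -- the fold's best element has second component r
        have hbval := (pvCands_mem arr _).mp hbmem
        have hrdom := hbdom _ hrmem
        have hb2 : (cs.foldl (fun b p =>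
            if p.1 > b.1 ∨ (p.1 = b.1 ∧ p.2 > b.2) then p else b) c).2 = r := by
          have h1 := hdom _ (Nat.zero_le _) hbval.1 hbval.2.1
          rcases hrdom with h | ⟨h, h'⟩ <;> rcases h1 with h1 | ⟨h1, h1'⟩ <;>
            rw [hbval.2.2] at * <;> omega
        -- reduce the `match` on the literal cons (definitional)
        show List.foldl (pvWrite arr) [] (pvPairs arr r 0) =
          match PySem.List.max? (pvBuildB arr
              (cs.foldl (fun b p => if p.1 > b.1 ∨ (p.1 = b.1 ∧ p.2 > b.2) then p else b) c).2 0
              PySem.Dict.empty).keys (fun k => k) with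
          | none => []
          | some m => (List.range (m+1)).map (fun k => (pvBuildB arr
              (cs.foldl (fun b p => if p.1 > b.1 ∨ (p.1 = b.1 ∧ p.2 > b.2) then p else b) c).2 0
              PySem.Dict.empty).getD k none)
        rw [hb2]
        rw [pvBuildB_eq_foldl]
        have hkeys := pvFold_mem_keys arr (pvPairs arr r 0)
        have h0mem : (0 : Nat) ∈ (pvPairs arr r 0).map (fun p => p.2) := by
          rw [pvPairs]
          simp
        have hkne : ((pvPairs arr r 0).foldl
            (fun d p => d.insert p.2 (arr.getD p.1 none))
            (PySem.Dict.empty : PySem.Dict Nat (Option Int))).keys ≠ [] := by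
          intro hnil
          have := (hkeys 0).mpr h0mem
          rw [hnil] at this
          cases this
        obtain ⟨m, hmq⟩ : ∃ m, PySem.List.max? ((pvPairs arr r 0).foldl
            (fun d p => d.insert p.2 (arr.getD p.1 none))
            (PySem.Dict.empty : PySem.Dict Nat (Option Int))).keys (fun k => k) = some m := by
          cases hq : PySem.List.max? ((pvPairs arr r 0).foldl
              (fun d p => d.insert p.2 (arr.getD p.1 none))
              (PySem.Dict.empty : PySem.Dict Nat (Option Int))).keys (fun k => k) with
          | none => exact absurd ((PySem.List.max?_eq_none_iff _ _).mp hq) hkne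
          | some m => exact ⟨m, rfl⟩
        rw [hmq]
        show List.foldl (pvWrite arr) [] (pvPairs arr r 0) =
          (List.range (m+1)).map (fun k => ((pvPairs arr r 0).foldl
            (fun d p => d.insert p.2 (arr.getD p.1 none))
            (PySem.Dict.empty : PySem.Dict Nat (Option Int))).getD k none)
        have hmmem := PySem.List.max?_mem hmq
        have hmmax := PySem.List.max?_isMax hmq
        have hlenW : ((pvPairs arr r 0).foldl (pvWrite arr) []).length = m + 1 := by
          rw [pvFold_length]
          have hle1 : m + 1 ≤ ((pvPairs arr r 0).map (fun p => p.2 + 1)).foldl max 0 := by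
            have hmm : m + 1 ∈ (pvPairs arr r 0).map (fun p => p.2 + 1) := by
              have := (hkeys m).mp hmmem
              obtain ⟨p, hp, hp2⟩ := List.mem_map.mp this
              exact List.mem_map.mpr ⟨p, hp, by omega⟩
            exact (PySem.List.le_foldl_max _ _).2 _ hmm
          have hle2 : ((pvPairs arr r 0).map (fun p => p.2 + 1)).foldl max 0 ≤ m + 1 := by
            rcases PySem.List.foldl_max_mem ((pvPairs arr r 0).map (fun p => p.2 + 1)) 0 with
              h | h
            · omega
            · obtain ⟨p, hp, hp2⟩ := List.mem_map.mp h
              have hpk : p.2 ∈ ((pvPairs arr r 0).foldl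
                  (fun d p => d.insert p.2 (arr.getD p.1 none))
                  (PySem.Dict.empty : PySem.Dict Nat (Option Int))).keys :=
                (hkeys p.2).mpr (List.mem_map.mpr ⟨p, hp, rfl⟩)
              have := hmmax _ hpk
              omega
          omega
        apply List.ext_getElem
        · rw [hlenW]
          simp
        · intro i h1 h2
          have hL : ((pvPairs arr r 0).foldl (pvWrite arr) [])[i]
              = ((pvPairs arr r 0).foldl (pvWrite arr) []).getD i none := by
            rw [List.getD_eq_getElem?_getD, List.getElem?_eq_getElem h1]; rfl
          rw [hL, pvFold_getD_eq]
          simp only [List.getElem_map, List.getElem_range]
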